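-- pv_equiv track=rewrite | github.com/FannyIsPrettyCool/bass-senpai | bass_senpai/artwork.py | _render_placeholder
-- ===== SOURCE A (Python) =====
-- def _render_placeholder(width: int = 40, height: int = 20) -> str:
--     """Render a placeholder when no artwork is available."""
--     lines = []
--
--     # Top border
--     lines.append('╔' + '═' * width + '╗')
--
--     # Middle lines with vertical borders
--     for y in range(height):
--         if y == height // 2:
--             text = "No Artwork"
--             padding = (width - len(text)) // 2
--             content = ' ' * padding + text + ' ' * (width - padding - len(text))
--             lines.append('║' + content + '║')
--         else:
--             lines.append('║' + ' ' * width + '║')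
--
--     # Bottom border
--     lines.append('╚' + '═' * width + '╝')
--
--     return '\n'.join(lines)
-- ===== SOURCE B (Python) =====
-- def _render_placeholder(width: int = 40, height: int = 20) -> str:
--     """Render a placeholder when no artwork is available."""
--     hbar = '═' * width
--     blank = '║' + ' ' * width + '║\n'
--     if height <= 0:
--         return '╔' + hbar + '╗\n' + '╚' + hbar + '╝'
--     pad = (width - 10) // 2
--     mid = '║' + ' ' * pad + 'No Artwork' + ' ' * (width - pad - 10) + '║\n'
--     return ('╔' + hbar + '╗\n'
--             + blank * (height // 2)
--             + mid
--             + blank * (height - height // 2 - 1)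
--             + '╚' + hbar + '╝')
-- ===== Notes on version B (the rewrite author's own statement) =====
-- stated objective: alternative
-- what changed: B has no per-row loop and no list of lines at all: it computes the counts of blank lines above and below the middle (height//2 and height-height//2-1) and concatenates three string blocks built by string multiplication, with a separate closed-form case for height <= 0.
import Mathlib
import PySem

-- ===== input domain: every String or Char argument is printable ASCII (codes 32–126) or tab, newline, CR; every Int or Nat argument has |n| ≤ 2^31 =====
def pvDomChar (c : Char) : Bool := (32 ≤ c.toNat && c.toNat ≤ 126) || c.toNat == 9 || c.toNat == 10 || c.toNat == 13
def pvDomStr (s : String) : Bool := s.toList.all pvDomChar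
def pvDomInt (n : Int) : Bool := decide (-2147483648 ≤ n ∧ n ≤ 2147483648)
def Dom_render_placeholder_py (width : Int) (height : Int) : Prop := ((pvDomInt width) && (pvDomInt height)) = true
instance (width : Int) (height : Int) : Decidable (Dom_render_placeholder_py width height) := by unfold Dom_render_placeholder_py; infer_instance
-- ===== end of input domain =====

-- B drops A's per-row loop and list of lines: it counts the blank lines above/below the middle and concatenates three multiplied string blocks (objective: alternative); same return value everywhere.
-- ===== PORT A =====
-- Python "c * n" for a single char: empty for n ≤ 0 (Int.toNat clamps exactly like Python)
def pvRep (c : Char) (n : Int) : String := String.ofList (List.replicate n.toNat c)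

def render_placeholder_py (width : Int) (height : Int) : String :=
  let lines : List String := ["╔" ++ pvRep '═' width ++ "╗"]
  let lines := (PySem.List.pyRange 0 height 1).foldl (fun acc y =>
    if y = PySem.Int.floordiv height 2 then
      let text := "No Artwork"
      let padding := PySem.Int.floordiv (width - PySem.Str.len text) 2
      let content := pvRep ' ' padding ++ text ++ pvRep ' ' (width - padding - PySem.Str.len text)
      acc ++ ["║" ++ content ++ "║"]
    else
      acc ++ ["║" ++ pvRep ' ' width ++ "║"]) lines
  let lines := lines ++ ["╚" ++ pvRep '═' width ++ "╝"]
  PySem.Str.join "\n" lines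

-- ===== PORT B =====
-- Python "s * n" for a string: empty for n ≤ 0
def pvRepS (s : String) (n : Int) : String := String.ofList (List.replicate n.toNat s.toList).flatten

def render_placeholder_py_alt (width : Int) (height : Int) : String :=
  let hbar := pvRep '═' width
  let blank := "║" ++ pvRep ' ' width ++ "║\n"
  if height ≤ 0 then
    "╔" ++ hbar ++ "╗\n" ++ "╚" ++ hbar ++ "╝"
  else
    let pad := PySem.Int.floordiv (width - 10) 2
    let mid := "║" ++ pvRep ' ' pad ++ "No Artwork" ++ pvRep ' ' (width - pad - 10) ++ "║\n"
    "╔" ++ hbar ++ "╗\n"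
      ++ pvRepS blank (PySem.Int.floordiv height 2)
      ++ mid
      ++ pvRepS blank (height - PySem.Int.floordiv height 2 - 1)
      ++ "╚" ++ hbar ++ "╝"

-- ===== PRECONDITION & SPEC =====
def Spec_render_placeholder_py (width : Int) (height : Int) (out : String) : Prop := out = render_placeholder_py_alt width height
instance (width : Int) (height : Int) (out : String) : Decidable (Spec_render_placeholder_py width height out) := by unfold Spec_render_placeholder_py; infer_instance

-- ===== CLAIM =====
def Claim_equal_render_placeholder_py : Prop := ∀ (width : Int) (height : Int), Dom_render_placeholder_py width height → Spec_render_placeholder_py width height (render_placeholder_py width height)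

-- ===== LEMMAS AND PROOFS =====

-- an append-only foldl with a branch is init ++ a branched map
theorem pv_foldl_ite_append_map {α β : Type} [DecidableEq α] (k : α) (a b : β) :
    ∀ (l : List α) (init : List β),
      l.foldl (fun acc y => if y = k then acc ++ [a] else acc ++ [b]) init
        = init ++ l.map (fun y => if y = k then a else b) := by
  intro l
  induction l with
  | nil => intro init; simp
  | cons x xs ih =>
    intro init
    by_cases hx : x = k <;> simp [List.foldl, hx, ih]

-- the branched map over range(h) is a uniform replicate with one overwrite
theorem pv_map_range_ite {β : Type} (h : Int) (hpos : 0 < h) (a b : β) :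
    (PySem.List.pyRange 0 h 1).map
        (fun y => if y = PySem.Int.floordiv h 2 then a else b)
      = (List.replicate h.toNat b).set (PySem.Int.floordiv h 2).toNat a := by
  have hk : PySem.Int.floordiv h 2 = h / 2 := PySem.Int.floordiv_eq_ediv_of_pos (by omega)
  rw [PySem.List.pyRange_one]
  apply List.ext_getElem
  · simp
  · intro i h1 h2
    have hi : i < h.toNat := by simpa using h1
    simp only [List.getElem_map, List.getElem_range, List.getElem_set,
      List.getElem_replicate, hk, zero_add]
    by_cases hc : (h / 2).toNat = i
    · have h1' : (i : Int) = h / 2 := by omega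
      simp [h1', hc]
    · have h1' : ¬ ((i : Int) = h / 2) := by omega
      simp [h1', hc]

-- a set inside a replicate splits it into two replicates around the new element
theorem pv_set_replicate {β : Type} (a b : β) :
    ∀ (n k : Nat), k < n →
      (List.replicate n b).set k a
        = List.replicate k b ++ a :: List.replicate (n - k - 1) b := by
  intro n
  induction n with
  | zero => intro k hk; omega
  | succ m ih =>
    intro k hk
    cases k with
    | zero => simp [List.replicate_succ]
    | succ k' =>
      simp [List.replicate_succ, ih k' (by omega)]

-- joining a bordered list of lines with '\n': top, then each body line with a trailing newline, then bottom
theorem pv_join_lines (t b : List Char) :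
    ∀ (L : List (List Char)),
      PySem.Chars.join ['\n'] (t :: (L ++ [b]))
        = t ++ '\n' :: ((L.map (· ++ ['\n'])).flatten ++ b) := by
  intro L
  induction L generalizing t with
  | nil => simp [PySem.Chars.join, List.intercalate]
  | cons x xs ih =>
    rw [List.cons_append, PySem.Chars.join_cons_cons, ih x]
    simp

-- the previous lemma in the exact three-block shape the main proof meets
theorem pv_join_three (t m bot bl : List Char) (k j : Nat) :
    PySem.Chars.join ['\n'] (t :: (List.replicate k bl ++ m :: (List.replicate j bl ++ [bot])))
      = t ++ '\n' :: ((List.replicate k (bl ++ ['\n'])).flatten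
          ++ (m ++ '\n' :: ((List.replicate j (bl ++ ['\n'])).flatten ++ bot))) := by
  have h := pv_join_lines t bot (List.replicate k bl ++ m :: List.replicate j bl)
  simpa [List.map_append, List.map_replicate, List.flatten_append] using h

-- ===== VERDICT =====
theorem render_placeholder_py_spec : Claim_equal_render_placeholder_py := by
  intro width height _
  unfold Spec_render_placeholder_py render_placeholder_py render_placeholder_py_alt
  dsimp only
  rw [pv_foldl_ite_append_map]
  by_cases hpos : 0 < height
  · have hle : ¬ (height ≤ 0) := by omega
    have hk : PySem.Int.floordiv height 2 = height / 2 :=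
      PySem.Int.floordiv_eq_ediv_of_pos (by omega)
    have hh2 : 0 ≤ height / 2 := by positivity
    have hlt : height / 2 < height := by omega
    rw [pv_map_range_ite height hpos, hk,
      pv_set_replicate _ _ height.toNat (height / 2).toNat (by omega)]
    have hj : height.toNat - (height / 2).toNat - 1 = (height - height / 2 - 1).toNat := by omega
    have hlen : PySem.Str.len "No Artwork" = (10 : Int) := by decide
    apply String.ext
    simp only [hle, if_false, hlen, PySem.Str.toList_join, List.map_append, List.map_cons,
      List.map_nil, List.map_replicate, String.toList_append,
      List.cons_append, List.append_assoc, List.nil_append]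
    have hnl : "\n".toList = ['\n'] := rfl
    rw [hj, hnl, pv_join_three]
    simp [pvRepS]
  · have h0 : height ≤ 0 := by omega
    rw [PySem.List.pyRange_one_eq_nil (by omega)]
    apply String.ext
    simp [h0, PySem.Str.toList_join, PySem.Chars.join, List.intercalate, pvRep]
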